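-- pv_equiv track=rewrite | github.com/davids52/BTL_AI | Maze.py | DFS
-- ===== SOURCE A (Python) =====
-- def DFS(start,end,maze,visited= None,path= None):
--     if visited is None:
--         visited = set()
--     if path is None:
--         path = []
--     path = path + [(start)]
--     visited.add(start)
--     if start == end:
--         return path
--
--     navigation = maze[(start)]
--
--     for direction in Corresponding_Position(start,end):
--         if navigation[direction] == False:
--             new_position = ChangPosition(start,direction)
--             if new_position not in visited:
--                 new_path = DFS(new_position,end,maze,visited,path)
--                 if new_path:
--                     return new_path
--     visited.remove(start)
--     return None
--
-- def Corresponding_Position(cur_posi,end):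
--     #TH1
--     if cur_posi[0] >= end[0] and cur_posi[1] > end[1]:
--         return ['left','top','bottom','right']
--     #TH2
--     elif cur_posi[0] >= end[0] and cur_posi[1] < end[1]:
--         return ['right','top','bottom','left']
--     elif cur_posi[0] > end[0] and cur_posi[1] == end[1]:
--         return ['top','left','right','bottom']
--     #Th3
--     elif cur_posi[0] <= end[0] and cur_posi[1] > end[1]:
--         return ['left','bottom','top','right']
--     #TH4
--     elif cur_posi[0] <= end[0] and cur_posi[1] < end[1]:
--         return ['right','bottom','top','left']
--     else:
--         return ['bottom','left','right','top']
--
-- def ChangPosition(cur_posi,navi):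
--     if navi == 'left':
--         return (cur_posi[0] - 1,cur_posi[1])
--     elif navi == 'right':
--         return (cur_posi[0] + 1,cur_posi[1])
--     elif navi == 'bottom':
--         return (cur_posi[0],cur_posi[1] +1)
--     else:
--         return (cur_posi[0],cur_posi[1] - 1)
-- ===== SOURCE B (Python) =====
-- def DFS(start, end, maze, visited=None, path=None):
--     vis = frozenset(visited) if visited is not None else frozenset()
--     base = list(path) if path is not None else []
--     return _search(start, end, maze, vis, base)
--
-- def _search(node, end, maze, vis, trail):
--     trail = trail + [node]
--     if node == end:
--         return trail
--     vis = vis | {node}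
--     nav = maze[node]
--     nbrs = [ChangPosition(node, d) for d in Corresponding_Position(node, end) if nav[d] == False]
--     for nxt in nbrs:
--         if nxt not in vis:
--             found = _search(nxt, end, maze, vis, trail)
--             if found:
--                 return found
--     return None
--
-- def Corresponding_Position(cur_posi,end):
--     if cur_posi[0] >= end[0] and cur_posi[1] > end[1]:
--         return ['left','top','bottom','right']
--     elif cur_posi[0] >= end[0] and cur_posi[1] < end[1]:
--         return ['right','top','bottom','left']
--     elif cur_posi[0] > end[0] and cur_posi[1] == end[1]:
--         return ['top','left','right','bottom']
--     elif cur_posi[0] <= end[0] and cur_posi[1] > end[1]: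
--         return ['left','bottom','top','right']
--     elif cur_posi[0] <= end[0] and cur_posi[1] < end[1]:
--         return ['right','bottom','top','left']
--     else:
--         return ['bottom','left','right','top']
--
-- def ChangPosition(cur_posi,navi):
--     if navi == 'left':
--         return (cur_posi[0] - 1,cur_posi[1])
--     elif navi == 'right':
--         return (cur_posi[0] + 1,cur_posi[1])
--     elif navi == 'bottom':
--         return (cur_posi[0],cur_posi[1] +1)
--     else:
--         return (cur_posi[0],cur_posi[1] - 1)
-- ===== Notes on version B (the rewrite author's own statement) =====
-- stated objective: simpler
-- what changed: B replaces A's shared mutable visited set with add/remove backtracking by a pure recursion over an immutable visited set plus a precomputed open-neighbour list per cell, exploiting that A's failing subcalls always restore the visited set; equivalence is about the return value only (A mutates the caller's visited set, B does not).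
import Mathlib
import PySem

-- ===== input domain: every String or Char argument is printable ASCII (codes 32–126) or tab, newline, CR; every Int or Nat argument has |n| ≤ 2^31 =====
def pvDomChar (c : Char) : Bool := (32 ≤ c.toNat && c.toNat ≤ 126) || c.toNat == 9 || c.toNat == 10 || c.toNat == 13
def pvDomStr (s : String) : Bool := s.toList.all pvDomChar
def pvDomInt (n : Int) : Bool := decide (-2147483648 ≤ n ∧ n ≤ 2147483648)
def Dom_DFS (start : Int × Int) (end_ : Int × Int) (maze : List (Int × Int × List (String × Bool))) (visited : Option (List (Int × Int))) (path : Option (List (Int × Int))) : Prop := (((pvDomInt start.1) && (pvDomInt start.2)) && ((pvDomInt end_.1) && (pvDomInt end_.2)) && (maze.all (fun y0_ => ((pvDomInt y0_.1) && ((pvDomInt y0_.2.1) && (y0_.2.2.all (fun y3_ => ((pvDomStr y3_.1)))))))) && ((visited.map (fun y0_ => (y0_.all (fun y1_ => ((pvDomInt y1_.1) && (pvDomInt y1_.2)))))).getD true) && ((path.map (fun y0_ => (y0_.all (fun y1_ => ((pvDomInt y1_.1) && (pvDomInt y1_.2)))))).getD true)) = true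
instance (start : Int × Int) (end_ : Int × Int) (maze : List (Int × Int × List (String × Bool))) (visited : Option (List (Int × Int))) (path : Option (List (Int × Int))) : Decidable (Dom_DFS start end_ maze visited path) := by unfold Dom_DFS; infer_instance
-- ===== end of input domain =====

-- B replaces A's shared mutable visited set (add on entry, remove on backtrack) by a pure
-- recursion over an immutable visited set plus a precomputed open-neighbour list per cell.
-- Equivalence is about the RETURN value only: Python A mutates the caller's visited set, B does not.

-- ===== shared module helpers (Corresponding_Position / ChangPosition, used by both Pythons) =====
def pvCP (cur end_ : Int × Int) : List String :=
  if cur.1 ≥ end_.1 ∧ cur.2 > end_.2 then ["left", "top", "bottom", "right"]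
  else if cur.1 ≥ end_.1 ∧ cur.2 < end_.2 then ["right", "top", "bottom", "left"]
  else if cur.1 > end_.1 ∧ cur.2 = end_.2 then ["top", "left", "right", "bottom"]
  else if cur.1 ≤ end_.1 ∧ cur.2 > end_.2 then ["left", "bottom", "top", "right"]
  else if cur.1 ≤ end_.1 ∧ cur.2 < end_.2 then ["right", "bottom", "top", "left"]
  else ["bottom", "left", "right", "top"]

def pvChangP (cur : Int × Int) (navi : String) : Int × Int :=
  if navi = "left" then (cur.1 - 1, cur.2)
  else if navi = "right" then (cur.1 + 1, cur.2)
  else if navi = "bottom" then (cur.1, cur.2 + 1)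
  else (cur.1, cur.2 - 1)

-- dict lookup maze[(x,y)] (first match; none = KeyError)
def pvMazeGet? (maze : List (Int × Int × List (String × Bool))) (k : Int × Int) : Option (List (String × Bool)) :=
  match maze with
  | [] => none
  | e :: rest => if (e.1, e.2.1) = k then some e.2.2 else pvMazeGet? rest k

-- dict lookup navigation[direction] (first match; none = KeyError)
def pvNavGet? (nav : List (String × Bool)) (d : String) : Option Bool :=
  match nav with
  | [] => none
  | (k, b) :: rest => if k = d then some b else pvNavGet? rest d

-- ===== PORT A =====
-- A's recursion threads the mutated visited set as explicit state (result, visited-after).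
-- Fuel only makes the recursion structural; on inputs admitted by Pre_DFS it never runs out
-- (recursion depth is bounded by the number of maze keys + 1).
mutual
def pvDfsA (fuel : Nat) (node end_ : Int × Int) (maze : List (Int × Int × List (String × Bool))) (vis : PySem.Set (Int × Int)) (path : List (Int × Int)) : Option (List (Int × Int)) × PySem.Set (Int × Int) :=
  match fuel with
  | 0 => (none, vis)
  | f + 1 =>
    let path2 := path ++ [node]
    let vis2 := PySem.Set.add vis node
    if node = end_ then (some path2, vis2)
    else
      match pvMazeGet? maze node with
      | none => (none, vis2)  -- Python raises KeyError here; excluded by Pre_DFS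
      | some nav => pvLoopA f node end_ maze nav path2 (pvCP node end_) vis2
  termination_by (fuel, 0)

def pvLoopA (f : Nat) (node end_ : Int × Int) (maze : List (Int × Int × List (String × Bool))) (nav : List (String × Bool)) (path2 : List (Int × Int)) (dirs : List String) (vis : PySem.Set (Int × Int)) : Option (List (Int × Int)) × PySem.Set (Int × Int) :=
  match dirs with
  | [] =>
    -- loop exhausted: visited.remove(start); return None
    match PySem.Set.remove? vis node with
    | some v => (none, v)
    | none => (none, vis)  -- KeyError; unreachable: node was added on entry
  | d :: ds =>
    match pvNavGet? nav d with
    | none => (none, vis)  -- Python raises KeyError here; excluded by Pre_DFS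
    | some b =>
      if b = false then
        let np := pvChangP node d
        if PySem.Set.contains vis np then pvLoopA f node end_ maze nav path2 ds vis
        else
          match pvDfsA f np end_ maze vis path2 with
          | (some p, vis') => if p.isEmpty then pvLoopA f node end_ maze nav path2 ds vis' else (some p, vis')
          | (none, vis') => pvLoopA f node end_ maze nav path2 ds vis'
      else pvLoopA f node end_ maze nav path2 ds vis
  termination_by (f, dirs.length + 1)
end

def DFS (start : Int × Int) (end_ : Int × Int) (maze : List (Int × Int × List (String × Bool))) (visited : Option (List (Int × Int))) (path : Option (List (Int × Int))) : Option (List (Int × Int)) :=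
  (pvDfsA (maze.length + 2) start end_ maze (PySem.Set.ofList (visited.getD [])) (path.getD [])).1

-- ===== PORT B =====
-- the list comprehension [ChangPosition(node,d) for d in Corresponding_Position(node,end) if nav[d] == False]
-- (none = KeyError on a missing direction key; excluded by Pre_DFS)
def pvNbrs (node : Int × Int) (nav : List (String × Bool)) : List String → Option (List (Int × Int))
  | [] => some []
  | d :: ds =>
    match pvNavGet? nav d with
    | none => none
    | some b =>
      match pvNbrs node nav ds with
      | none => none
      | some rest => some (if b = false then pvChangP node d :: rest else rest)

mutual
def pvDfsB (fuel : Nat) (node end_ : Int × Int) (maze : List (Int × Int × List (String × Bool))) (vis : PySem.Set (Int × Int)) (trail : List (Int × Int)) : Option (List (Int × Int)) :=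
  match fuel with
  | 0 => none
  | f + 1 =>
    let trail2 := trail ++ [node]
    if node = end_ then some trail2
    else
      let vis2 := PySem.Set.add vis node
      match pvMazeGet? maze node with
      | none => none  -- Python raises KeyError here; excluded by Pre_DFS
      | some nav =>
        match pvNbrs node nav (pvCP node end_) with
        | none => none  -- KeyError inside the comprehension; excluded by Pre_DFS
        | some nbrs => pvLoopB f end_ maze vis2 trail2 nbrs
  termination_by (fuel, 0)

def pvLoopB (f : Nat) (end_ : Int × Int) (maze : List (Int × Int × List (String × Bool))) (vis2 : PySem.Set (Int × Int)) (trail2 : List (Int × Int)) (nbrs : List (Int × Int)) : Option (List (Int × Int)) :=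
  match nbrs with
  | [] => none
  | nxt :: rest =>
    if PySem.Set.contains vis2 nxt then pvLoopB f end_ maze vis2 trail2 rest
    else
      match pvDfsB f nxt end_ maze vis2 trail2 with
      | some p => if p.isEmpty then pvLoopB f end_ maze vis2 trail2 rest else some p
      | none => pvLoopB f end_ maze vis2 trail2 rest
  termination_by (f, nbrs.length + 1)
end

def DFS_alt (start : Int × Int) (end_ : Int × Int) (maze : List (Int × Int × List (String × Bool))) (visited : Option (List (Int × Int))) (path : Option (List (Int × Int))) : Option (List (Int × Int)) :=
  pvDfsB (maze.length + 2) start end_ maze (PySem.Set.ofList (visited.getD [])) (path.getD [])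

-- ===== PRECONDITION & SPEC =====
def pvDirs4 : List String := ["left", "right", "top", "bottom"]

-- the maze's key set
def pvKeys (maze : List (Int × Int × List (String × Bool))) : List (Int × Int) :=
  maze.map (fun e => (e.1, e.2.1))

-- every cell carries all four direction keys, and every open wall of a cell leads to the
-- end or to a maze key
def pvWF (maze : List (Int × Int × List (String × Bool))) (end_ : Int × Int) : Prop :=
  ∀ e ∈ maze,
    (∀ d ∈ pvDirs4, ∃ b, (d, b) ∈ e.2.2) ∧
    (∀ pr ∈ e.2.2, pr.1 ∈ pvDirs4 → pr.2 = false →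
      (pvChangP (e.1, e.2.1) pr.1 = end_ ∨ pvChangP (e.1, e.2.1) pr.1 ∈ pvKeys maze))

-- Pre_DFS excludes the inputs where A raises KeyError (start not a maze key, a reachable
-- cell without all four direction keys, an open wall leading to a dangling non-end cell);
-- being a global well-formedness condition it also excludes some inputs where A returns
-- without ever consulting the malformed cell — there B's comprehension raises KeyError.
def Pre_DFS (start : Int × Int) (end_ : Int × Int) (maze : List (Int × Int × List (String × Bool))) (visited : Option (List (Int × Int))) (path : Option (List (Int × Int))) : Prop :=
  start = end_ ∨ (start ∈ pvKeys maze ∧ pvWF maze end_)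
instance (start : Int × Int) (end_ : Int × Int) (maze : List (Int × Int × List (String × Bool))) (visited : Option (List (Int × Int))) (path : Option (List (Int × Int))) : Decidable (Pre_DFS start end_ maze visited path) := by unfold Pre_DFS pvWF; infer_instance

def pvWitness_DFS : (Int × Int) × (Int × Int) × (List (Int × Int × List (String × Bool))) × (Option (List (Int × Int))) × (Option (List (Int × Int))) :=
  ((0, 0), (0, 1), [(0, 0, [("right", true), ("top", true), ("bottom", false), ("left", true)]), (0, 1, [("right", true), ("top", false), ("bottom", true), ("left", true)])], none, none)

def Spec_DFS (start : Int × Int) (end_ : Int × Int) (maze : List (Int × Int × List (String × Bool))) (visited : Option (List (Int × Int))) (path : Option (List (Int × Int))) (out : Option (List (Int × Int))) : Prop := out = DFS_alt start end_ maze visited path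
instance (start : Int × Int) (end_ : Int × Int) (maze : List (Int × Int × List (String × Bool))) (visited : Option (List (Int × Int))) (path : Option (List (Int × Int))) (out : Option (List (Int × Int))) : Decidable (Spec_DFS start end_ maze visited path out) := by unfold Spec_DFS; infer_instance

-- ===== CLAIM (what is proved, stated in full; the proofs are below) =====
def Claim_equal_DFS : Prop := ∀ (start : Int × Int) (end_ : Int × Int) (maze : List (Int × Int × List (String × Bool))) (visited : Option (List (Int × Int))) (path : Option (List (Int × Int))), Dom_DFS start end_ maze visited path → Pre_DFS start end_ maze visited path → Spec_DFS start end_ maze visited path (DFS start end_ maze visited path)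

-- ===== LEMMAS AND PROOFS =====

theorem pvDiscard_of_not_mem {s : PySem.Set (Int × Int)} {x : Int × Int} (h : x ∉ s) :
    PySem.Set.discard s x = s := by
  unfold PySem.Set.discard
  apply List.filter_eq_self.mpr
  intro y hy
  simp only [Bool.not_eq_true', beq_eq_false_iff_ne, ne_eq]
  exact fun hxy => h (hxy ▸ hy)

theorem pvCP_subset (cur end_ : Int × Int) : ∀ d ∈ pvCP cur end_, d ∈ pvDirs4 := by
  intro d hd
  unfold pvCP at hd
  split_ifs at hd <;> simp only [pvDirs4, List.mem_cons, List.not_mem_nil, or_false] at hd ⊢ <;> tauto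

theorem pvMazeGet?_mem {maze : List (Int × Int × List (String × Bool))} {k : Int × Int} {nav : List (String × Bool)}
    (h : pvMazeGet? maze k = some nav) : ∃ e ∈ maze, (e.1, e.2.1) = k ∧ e.2.2 = nav := by
  induction maze with
  | nil => simp [pvMazeGet?] at h
  | cons e rest ihm =>
    rw [pvMazeGet?] at h
    by_cases hk : (e.1, e.2.1) = k
    · rw [if_pos hk] at h
      exact ⟨e, List.mem_cons_self, hk, Option.some.inj h⟩
    · rw [if_neg hk] at h
      obtain ⟨e', he', hk', hn'⟩ := ihm h
      exact ⟨e', List.mem_cons_of_mem _ he', hk', hn'⟩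

theorem pvMazeGet?_isSome_of_mem_keys {maze : List (Int × Int × List (String × Bool))} {k : Int × Int}
    (h : k ∈ pvKeys maze) : (pvMazeGet? maze k).isSome = true := by
  induction maze with
  | nil => simp [pvKeys] at h
  | cons e rest ihm =>
    rw [pvMazeGet?]
    by_cases hk : (e.1, e.2.1) = k
    · rw [if_pos hk]; rfl
    · rw [if_neg hk]
      apply ihm
      rcases List.mem_cons.mp h with h1 | h1
      · exact absurd h1.symm hk
      · exact h1

theorem pvNavGet?_isSome_of_mem {nav : List (String × Bool)} {d : String} {b0 : Bool}
    (h : (d, b0) ∈ nav) : (pvNavGet? nav d).isSome = true := by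
  induction nav with
  | nil => simp at h
  | cons pr rest ihn =>
    obtain ⟨k, b⟩ := pr
    rw [pvNavGet?]
    by_cases hk : k = d
    · rw [if_pos hk]; rfl
    · rw [if_neg hk]
      apply ihn
      rcases List.mem_cons.mp h with h1 | h1
      · exact absurd (congrArg Prod.fst h1.symm) hk
      · exact h1

theorem pvNavGet?_mem {nav : List (String × Bool)} {d : String} {b : Bool}
    (h : pvNavGet? nav d = some b) : (d, b) ∈ nav := by
  induction nav with
  | nil => simp [pvNavGet?] at h
  | cons pr rest ihn =>
    obtain ⟨k, b'⟩ := pr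
    rw [pvNavGet?] at h
    by_cases hk : k = d
    · rw [if_pos hk] at h
      exact hk ▸ (Option.some.inj h) ▸ List.mem_cons_self
    · rw [if_neg hk] at h
      exact List.mem_cons_of_mem _ (ihn h)

-- extraction from the well-formedness condition
theorem pvWF_elim {maze : List (Int × Int × List (String × Bool))} {end_ p : Int × Int} {nav : List (String × Bool)}
    (hwf : pvWF maze end_) (hget : pvMazeGet? maze p = some nav) {d : String} (hd : d ∈ pvDirs4) :
    ∃ b, pvNavGet? nav d = some b ∧ (b = false → (pvChangP p d = end_ ∨ (pvMazeGet? maze (pvChangP p d)).isSome = true)) := by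
  obtain ⟨e, he, hk, hn⟩ := pvMazeGet?_mem hget
  obtain ⟨hall, hopen⟩ := hwf e he
  obtain ⟨b0, hb0⟩ := hall d hd
  rw [hn] at hb0
  obtain ⟨b, hb⟩ := Option.isSome_iff_exists.mp (pvNavGet?_isSome_of_mem hb0)
  refine ⟨b, hb, fun hbf => ?_⟩
  have hmem : (d, b) ∈ e.2.2 := hn ▸ pvNavGet?_mem hb
  have := hopen (d, b) hmem hd hbf
  rw [hk] at this
  rcases this with h | h
  · exact Or.inl h
  · exact Or.inr (pvMazeGet?_isSome_of_mem_keys h)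

theorem pvNbrs_some {maze : List (Int × Int × List (String × Bool))} {end_ node : Int × Int} {nav : List (String × Bool)}
    (hwf : pvWF maze end_) (hget : pvMazeGet? maze node = some nav) :
    ∀ (ds : List String), (∀ d ∈ ds, d ∈ pvDirs4) → (pvNbrs node nav ds).isSome = true := by
  intro ds
  induction ds with
  | nil => intro _; rfl
  | cons d ds ihd =>
    intro hsub
    obtain ⟨b, hb, _⟩ := pvWF_elim hwf hget (hsub d List.mem_cons_self)
    have h := ihd fun x hx => hsub x (List.mem_cons_of_mem _ hx)
    obtain ⟨rest, hr⟩ := Option.isSome_iff_exists.mp h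
    rw [pvNbrs, hb, hr]
    rfl

-- the induction invariant: on well-formed mazes, at every fuel, A's result is B's result,
-- a failing A call leaves the visited set equal to vis or to vis minus node (exactly vis
-- when node ∉ vis, which is how every recursive call is made), and a success is non-empty
def pvAgree (f : Nat) : Prop :=
  ∀ (node end_ : Int × Int) (maze : List (Int × Int × List (String × Bool))) (vis : PySem.Set (Int × Int)) (trail : List (Int × Int)),
    pvWF maze end_ → (node = end_ ∨ (pvMazeGet? maze node).isSome = true) →
    (pvDfsA f node end_ maze vis trail).1 = pvDfsB f node end_ maze vis trail
    ∧ (pvDfsB f node end_ maze vis trail = none →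
        ((pvDfsA f node end_ maze vis trail).2 = vis ∨ (pvDfsA f node end_ maze vis trail).2 = PySem.Set.discard vis node))
    ∧ (∀ p, pvDfsB f node end_ maze vis trail = some p → p ≠ [])

theorem pvLoop_agree (f : Nat) (ih : pvAgree f) (node end_ : Int × Int)
    (maze : List (Int × Int × List (String × Bool))) (nav : List (String × Bool)) (trail2 : List (Int × Int))
    (hwf : pvWF maze end_) (hget : pvMazeGet? maze node = some nav) :
    ∀ (dirs : List String), (∀ d ∈ dirs, d ∈ pvDirs4) → ∀ (vis2 : PySem.Set (Int × Int)), node ∈ vis2 →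
    (pvLoopA f node end_ maze nav trail2 dirs vis2).1 =
      (match pvNbrs node nav dirs with
       | none => none
       | some nbrs => pvLoopB f end_ maze vis2 trail2 nbrs)
    ∧ ((match pvNbrs node nav dirs with
        | none => none
        | some nbrs => pvLoopB f end_ maze vis2 trail2 nbrs) = none →
        (pvLoopA f node end_ maze nav trail2 dirs vis2).2 = PySem.Set.discard vis2 node)
    ∧ (∀ p, (match pvNbrs node nav dirs with
        | none => none
        | some nbrs => pvLoopB f end_ maze vis2 trail2 nbrs) = some p → p ≠ []) := by
  intro dirs
  induction dirs with
  | nil =>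
    intro _ vis2 hmem
    simp [pvLoopA, pvNbrs, pvLoopB, PySem.Set.remove?_of_mem hmem]
  | cons d ds ihd =>
    intro hsub vis2 hmem
    obtain ⟨b, hb, hbok⟩ := pvWF_elim hwf hget (hsub d List.mem_cons_self)
    have hsub' : ∀ x ∈ ds, x ∈ pvDirs4 := fun x hx => hsub x (List.mem_cons_of_mem _ hx)
    have IH := ihd hsub' vis2 hmem
    obtain ⟨rest, hnb⟩ := Option.isSome_iff_exists.mp (pvNbrs_some hwf hget ds hsub')
    rw [hnb] at IH
    rw [pvLoopA, pvNbrs, hb, hnb]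
    simp only at IH ⊢
    by_cases hbf : b = false
    · subst hbf
      simp only [reduceIte, pvLoopB]
      by_cases hv : PySem.Set.contains vis2 (pvChangP node d) = true
      · rw [if_pos hv, if_pos hv]; exact IH
      · rw [if_neg hv, if_neg hv]
        have hnp : pvChangP node d ∉ vis2 := fun hc => hv ((PySem.Set.contains_iff _ _).mpr hc)
        have hok' : pvChangP node d = end_ ∨ (pvMazeGet? maze (pvChangP node d)).isSome = true := hbok rfl
        have hch := ih (pvChangP node d) end_ maze vis2 trail2 hwf hok'
        cases hcb : pvDfsB f (pvChangP node d) end_ maze vis2 trail2 with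
        | some p =>
          have hpne := hch.2.2 p hcb
          have hfst := hch.1
          rw [hcb] at hfst
          cases hca : pvDfsA f (pvChangP node d) end_ maze vis2 trail2 with
          | mk r v =>
            rw [hca] at hfst; simp only at hfst; subst hfst
            cases p with
            | nil => exact absurd rfl hpne
            | cons a q =>
              refine ⟨rfl, fun h => ?_, fun p' hp' => ?_⟩
              · simp at h
              · simp only [List.isEmpty_cons, Bool.false_eq_true, if_false, Option.some.injEq] at hp'
                obtain rfl := hp'
                exact hpne
        | none =>
          have hfst := hch.1
          have hrest := hch.2.1 hcb
          rw [hcb] at hfst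
          cases hca : pvDfsA f (pvChangP node d) end_ maze vis2 trail2 with
          | mk r v =>
            rw [hca] at hfst hrest; simp only at hfst hrest; subst hfst
            have hv2 : v = vis2 := by
              rcases hrest with h | h
              · exact h
              · rw [pvDiscard_of_not_mem hnp] at h; exact h
            subst hv2
            exact IH
    · have hbt : b = true := by
        cases b
        · exact absurd rfl hbf
        · rfl
      subst hbt
      exact IH

theorem pvAgree_all (f : Nat) : pvAgree f := by
  induction f with
  | zero =>
    intro node end_ maze vis trail hwf hok
    have hA : pvDfsA 0 node end_ maze vis trail = (none, vis) := by rw [pvDfsA]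
    have hB : pvDfsB 0 node end_ maze vis trail = none := by rw [pvDfsB]
    exact ⟨by rw [hA, hB], fun _ => Or.inl (by rw [hA]), fun p hp => by rw [hB] at hp; exact absurd hp (by simp)⟩
  | succ f ihf =>
    intro node end_ maze vis trail hwf hok
    by_cases hend : node = end_
    · subst hend
      refine ⟨by simp [pvDfsA, pvDfsB], fun h => by simp [pvDfsB] at h, fun p hp => ?_⟩
      rw [pvDfsB] at hp
      simp only [reduceIte] at hp
      exact (Option.some.inj hp) ▸ (by simp)
    · cases hget : pvMazeGet? maze node with
      | none =>
        rcases hok with h | h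
        · exact absurd h hend
        · rw [hget] at h; simp at h
      | some nav =>
        have hA : pvDfsA (f + 1) node end_ maze vis trail =
            pvLoopA f node end_ maze nav (trail ++ [node]) (pvCP node end_) (PySem.Set.add vis node) := by
          rw [pvDfsA]
          simp only [if_neg hend, hget]
        have hB : pvDfsB (f + 1) node end_ maze vis trail =
            (match pvNbrs node nav (pvCP node end_) with
             | none => none
             | some nbrs => pvLoopB f end_ maze (PySem.Set.add vis node) (trail ++ [node]) nbrs) := by
          rw [pvDfsB]
          simp only [if_neg hend, hget]
        have hmem : node ∈ PySem.Set.add vis node := by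
          rw [PySem.Set.mem_add]; exact Or.inr rfl
        have HL := pvLoop_agree f ihf node end_ maze nav (trail ++ [node]) hwf hget
          (pvCP node end_) (pvCP_subset node end_) (PySem.Set.add vis node) hmem
        refine ⟨by rw [hA, hB]; exact HL.1, fun hnone => ?_, fun p hp => ?_⟩
        · rw [hB] at hnone
          have hsnd := HL.2.1 hnone
          rw [hA, hsnd]
          by_cases hv : node ∈ vis
          · rw [PySem.Set.add_of_mem hv]; exact Or.inr rfl
          · rw [PySem.Set.add_of_not_mem hv]
            left
            unfold PySem.Set.discard
            rw [List.filter_append]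
            have h1 : List.filter (fun y => !y == node) vis = vis :=
              pvDiscard_of_not_mem hv
            have h2 : List.filter (fun y => !y == node) [node] = [] := by simp
            rw [h1, h2, List.append_nil]
        · rw [hB] at hp
          exact HL.2.2 p hp

-- ===== VERDICT (by name: the statement is the Claim_ definition above) =====
theorem DFS_spec : Claim_equal_DFS := by
  intro start end_ maze visited path _ hpre
  unfold Spec_DFS DFS DFS_alt
  rcases hpre with h | ⟨hsome, hwf⟩
  · obtain ⟨f, hf⟩ : ∃ f, maze.length + 2 = f + 1 := ⟨maze.length + 1, rfl⟩
    rw [hf]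
    simp [pvDfsA, pvDfsB, h]
  · exact (pvAgree_all (maze.length + 2) start end_ maze _ _ hwf (Or.inr (pvMazeGet?_isSome_of_mem_keys hsome))).1
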